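-- pv_equiv track=rewrite | github.com/naujoh/aoc-2022 | day_3/rucksack_rearrangement.py | get_common_item_in_compartments
-- ===== SOURCE A (Python) =====
-- def get_common_item_in_compartments(items: str) -> str:
--     '''
--         Function written to solve 1st part of the puzzle
--     '''
--     common_item = None
--     items_registry = dict()
--     items_per_compartment = int(len(items)/2)
--     for i, item in enumerate(items):
--         if not items_registry.get(item):
--             item_count = [0, 0]
--             if i + 1 <= items_per_compartment:
--                 item_count[0] += 1
--             else:
--                 item_count[1] += 1
--
--             items_registry[item] = item_count
--         else:
--             if i + 1 <= items_per_compartment: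
--                 items_registry[item][0] += 1
--             else:
--                 items_registry[item][1] += 1
--         if items_registry[item][0] > 0 and items_registry[item][1] > 0:
--             common_item = item
--             break
--     if not common_item:
--         raise ValueError('Cannot find common item in items list')
--     return common_item
-- ===== SOURCE B (Python) =====
-- def get_common_item_in_compartments(items: str) -> str:
--     '''
--         Function written to solve 1st part of the puzzle
--     '''
--     split = len(items) // 2
--     first = set(items[:split])
--     for item in items[split:]:
--         if item in first:
--             return item
--     raise ValueError('Cannot find common item in items list')
-- ===== Notes on version B (the rewrite author's own statement) =====
-- stated objective: simpler
-- what changed: Replaces A's single fused pass that maintains a dict of per-compartment count pairs with an early break by a two-phase computation: build a set of the first compartment, then scan the second compartment for the first member of that set.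
import Mathlib
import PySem

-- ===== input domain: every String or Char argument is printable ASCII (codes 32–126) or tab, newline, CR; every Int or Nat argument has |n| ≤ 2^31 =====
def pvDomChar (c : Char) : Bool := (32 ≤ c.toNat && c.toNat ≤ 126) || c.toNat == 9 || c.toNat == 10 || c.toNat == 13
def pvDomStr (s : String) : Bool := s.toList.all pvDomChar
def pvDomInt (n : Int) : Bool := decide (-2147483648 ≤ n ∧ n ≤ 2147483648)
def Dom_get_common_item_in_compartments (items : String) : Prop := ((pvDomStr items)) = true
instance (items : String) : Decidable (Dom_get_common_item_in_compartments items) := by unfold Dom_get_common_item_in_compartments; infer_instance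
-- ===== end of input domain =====

-- B replaces A's fused count-dict pass by a build-set-then-scan-second-half two-phase computation (objective: simpler).

-- ===== PORT A =====
-- one loop step's registry update: the 'if not items_registry.get(item)' branch pair
-- (the stored lists are always the non-empty [a, b], so Python's truthiness test on
-- items_registry.get(item) is exactly 'the key is absent': get? is none)
def pvAUpdate (s : Int) (reg : PySem.Dict Char (Int × Int)) (i : Int) (c : Char) :
    PySem.Dict Char (Int × Int) :=
  if (reg.get? c).isNone then
    reg.insert c (if i + 1 ≤ s then (0 + 1, 0) else (0, 0 + 1))
  else
    reg.modify c (0, 0) (fun p => if i + 1 ≤ s then (p.1 + 1, p.2) else (p.1, p.2 + 1))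

-- the 'for i, item in enumerate(items)' loop with its early break
def pvALoop (s : Int) : List (Int × Char) → PySem.Dict Char (Int × Int) → Option Char
  | [], _ => none
  | (i, c) :: rest, reg =>
    let reg' := pvAUpdate s reg i c
    match reg'.get? c with
    | some p => if 0 < p.1 ∧ 0 < p.2 then some c else pvALoop s rest reg'
    | none => pvALoop s rest reg'   -- unreachable: after the update the key is present

def get_common_item_in_compartments (items : String) : String :=
  -- items_per_compartment = int(len(items)/2): length is nonneg, so Int '/' 2 is Python's value
  match pvALoop ((items.toList.length : Int) / 2) (PySem.List.enumerate items.toList 0) PySem.Dict.empty with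
  | some c => String.ofList [c]
  | none => ""   -- Python raises ValueError here; excluded by Pre_

-- ===== PORT B =====
def pvBScan (first : PySem.Set Char) : List Char → Option Char
  | [] => none
  | c :: rest => if PySem.Set.contains first c then some c else pvBScan first rest

def get_common_item_in_compartments_alt (items : String) : String :=
  -- split = len(items) // 2; first = set(items[:split]); scan items[split:]
  match pvBScan (PySem.Set.ofList (items.toList.take (items.toList.length / 2)))
      (items.toList.drop (items.toList.length / 2)) with
  | some c => String.ofList [c]
  | none => ""   -- Python raises ValueError here; excluded by Pre_

-- ===== PRECONDITION & SPEC =====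
-- Pre_ excludes exactly the inputs on which both Pythons raise ValueError:
-- no character of the second compartment occurs in the first compartment.
def Pre_get_common_item_in_compartments (items : String) : Prop :=
  ((items.toList.drop (items.toList.length / 2)).any
    (fun c => (items.toList.take (items.toList.length / 2)).contains c)) = true
instance (items : String) : Decidable (Pre_get_common_item_in_compartments items) := by
  unfold Pre_get_common_item_in_compartments; infer_instance

def pvWitness_get_common_item_in_compartments : String := "abca"

def Spec_get_common_item_in_compartments (items : String) (out : String) : Prop := out = get_common_item_in_compartments_alt items
instance (items : String) (out : String) : Decidable (Spec_get_common_item_in_compartments items out) := by unfold Spec_get_common_item_in_compartments; infer_instance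

-- ===== CLAIM (what is proved, stated in full; the proofs are below) =====
def Claim_equal_get_common_item_in_compartments : Prop := ∀ (items : String), Dom_get_common_item_in_compartments items → Pre_get_common_item_in_compartments items → Spec_get_common_item_in_compartments items (get_common_item_in_compartments items)

-- ===== LEMMAS AND PROOFS =====

-- registry after a breakless run of A's loop
def pvARegs (s : Int) (ps : List (Int × Char)) (reg : PySem.Dict Char (Int × Int)) :
    PySem.Dict Char (Int × Int) :=
  ps.foldl (fun r p => pvAUpdate s r p.1 p.2) reg

theorem pvALoop_append (s : Int) (ps qs : List (Int × Char)) (reg : PySem.Dict Char (Int × Int)) :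
    pvALoop s (ps ++ qs) reg =
      match pvALoop s ps reg with
      | some c => some c
      | none => pvALoop s qs (pvARegs s ps reg) := by
  induction ps generalizing reg with
  | nil => simp [pvALoop, pvARegs]
  | cons p rest ih =>
    obtain ⟨i, c⟩ := p
    simp only [List.cons_append, pvALoop]
    cases h : (pvAUpdate s reg i c).get? c with
    | none => simpa [h, pvARegs, List.foldl_cons] using ih _
    | some v =>
      by_cases hv : 0 < v.1 ∧ 0 < v.2
      · simp [h, hv]
      · simpa [h, hv, pvARegs, List.foldl_cons] using ih _

theorem pvAUpdate_getD (s : Int) (reg : PySem.Dict Char (Int × Int)) (i : Int) (c c' : Char) :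
    (pvAUpdate s reg i c).getD c' (0, 0) =
      if c' = c then
        (if i + 1 ≤ s then ((reg.getD c (0, 0)).1 + 1, (reg.getD c (0, 0)).2)
         else ((reg.getD c (0, 0)).1, (reg.getD c (0, 0)).2 + 1))
      else reg.getD c' (0, 0) := by
  unfold pvAUpdate
  cases h : reg.get? c with
  | none =>
    have hD : reg.getD c (0, 0) = ((0 : Int), (0 : Int)) := PySem.Dict.getD_of_get?_eq_none reg _ h
    simp [h, PySem.Dict.getD_insert, hD]
  | some v =>
    have hD : reg.getD c (0, 0) = v := PySem.Dict.getD_of_get?_eq_some reg _ h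
    simp [h, PySem.Dict.getD_modify, hD]

theorem pvAUpdate_get?_self (s : Int) (reg : PySem.Dict Char (Int × Int)) (i : Int) (c : Char) :
    (pvAUpdate s reg i c).get? c = some ((pvAUpdate s reg i c).getD c (0, 0)) := by
  unfold pvAUpdate
  cases h : reg.get? c with
  | none =>
    simp [h, PySem.Dict.get?_insert_self, PySem.Dict.getD_insert]
  | some v =>
    have hc : (reg.modify c ((0:Int), (0:Int))
        (fun p => if i + 1 ≤ s then (p.1 + 1, p.2) else (p.1, p.2 + 1))).contains c = true := by
      rw [PySem.Dict.contains_modify]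
      simp [PySem.Dict.contains_eq_isSome_get?, h]
    simp only [h, Option.isNone_some, Bool.false_eq_true, if_false]
    cases h2 : (reg.modify c ((0:Int), (0:Int))
        (fun p => if i + 1 ≤ s then (p.1 + 1, p.2) else (p.1, p.2 + 1))).get? c with
    | none =>
      exfalso
      rw [PySem.Dict.contains_eq_isSome_get?, h2] at hc
      simp at hc
    | some w =>
      rw [PySem.Dict.getD_of_get?_eq_some _ _ h2]

-- Phase 1: all indices are < s, so the break never fires; afterwards the positive-first-count
-- keys are exactly the old ones plus the scanned characters, and second counts stay 0.
theorem pvALoop_phase1 (s : Int) (xs : List Char) :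
    ∀ (k : Int) (reg : PySem.Dict Char (Int × Int)),
      k + xs.length ≤ s →
      (∀ c, (reg.getD c (0, 0)).2 = 0) →
      (∀ c, 0 ≤ (reg.getD c (0, 0)).1) →
      pvALoop s (PySem.List.enumerate xs k) reg = none ∧
      (∀ c, ((pvARegs s (PySem.List.enumerate xs k) reg).getD c (0, 0)).2 = 0) ∧
      (∀ c, 0 ≤ ((pvARegs s (PySem.List.enumerate xs k) reg).getD c (0, 0)).1) ∧
      (∀ c, (0 < ((pvARegs s (PySem.List.enumerate xs k) reg).getD c (0, 0)).1 ↔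
              0 < (reg.getD c (0, 0)).1 ∨ c ∈ xs)) := by
  induction xs with
  | nil =>
    intro k reg _ hq hp
    simp [PySem.List.enumerate_nil, pvALoop, pvARegs, hq, hp]
  | cons x rest ih =>
    intro k reg hk hq hp
    have hks : k + 1 ≤ s := by simp at hk; omega
    rw [PySem.List.enumerate_cons]
    set reg' := pvAUpdate s reg k x with hreg'
    have hupd : ∀ c', reg'.getD c' (0, 0) =
        if c' = x then ((reg.getD x (0, 0)).1 + 1, (reg.getD x (0, 0)).2)
        else reg.getD c' (0, 0) := by
      intro c'
      rw [hreg', pvAUpdate_getD]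
      simp [hks]
    have hq' : ∀ c, (reg'.getD c (0, 0)).2 = 0 := by
      intro c; rw [hupd]; split_ifs with h
      · simp [hq x]
      · exact hq c
    have hp' : ∀ c, 0 ≤ (reg'.getD c (0, 0)).1 := by
      intro c; rw [hupd]; split_ifs with h
      · have := hp x; simp; omega
      · exact hp c
    have hkrest : (k + 1) + rest.length ≤ s := by simp at hk; omega
    obtain ⟨hnone, hq2, hp2, hpos⟩ := ih (k + 1) reg' hkrest hq' hp'
    have hget : reg'.get? x = some (reg'.getD x (0, 0)) := pvAUpdate_get?_self s reg k x
    have hcond : ¬ (0 < (reg'.getD x (0, 0)).1 ∧ 0 < (reg'.getD x (0, 0)).2) := by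
      have := hq' x; omega
    refine ⟨?_, ?_, ?_, ?_⟩
    · simp only [pvALoop, ← hreg', hget]
      rw [if_neg hcond]
      exact hnone
    · intro c
      simpa [pvARegs, List.foldl_cons] using hq2 c
    · intro c
      simpa [pvARegs, List.foldl_cons] using hp2 c
    · intro c
      have hstep : pvARegs s ((k, x) :: PySem.List.enumerate rest (k + 1)) reg
          = pvARegs s (PySem.List.enumerate rest (k + 1)) reg' := by
        simp [pvARegs, List.foldl_cons, hreg']
      rw [hstep, hpos c, hupd c]
      by_cases hc : c = x
      · subst hc
        have := hp c
        simp
        omega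
      · simp [hc]

-- Phase 2: every index is ≥ s, so first counts never change and second counts become
-- positive at the current key: the loop returns the first character whose first count is positive.
-- the actual phase-2 characterisation
theorem pvALoop_phase2' (s : Int) (ys : List Char) (F : PySem.Set Char) :
    ∀ (k : Int) (reg : PySem.Dict Char (Int × Int)),
      s ≤ k →
      (∀ c, 0 ≤ (reg.getD c (0, 0)).2) →
      (∀ c, (0 < (reg.getD c (0, 0)).1 ↔ PySem.Set.contains F c = true)) →
      pvALoop s (PySem.List.enumerate ys k) reg = pvBScan F ys := by
  induction ys with
  | nil => intro k reg _ _ _; simp [PySem.List.enumerate_nil, pvALoop, pvBScan]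
  | cons y rest ih =>
    intro k reg hk hq hF
    have hks : ¬ (k + 1 ≤ s) := by omega
    rw [PySem.List.enumerate_cons]
    set reg' := pvAUpdate s reg k y with hreg'
    have hupd : ∀ c', reg'.getD c' (0, 0) =
        if c' = y then ((reg.getD y (0, 0)).1, (reg.getD y (0, 0)).2 + 1)
        else reg.getD c' (0, 0) := by
      intro c'
      rw [hreg', pvAUpdate_getD]
      simp [hks]
    have hq' : ∀ c, 0 ≤ (reg'.getD c (0, 0)).2 := by
      intro c; rw [hupd]; split_ifs with h
      · have := hq y; simp; omega
      · exact hq c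
    have hF' : ∀ c, (0 < (reg'.getD c (0, 0)).1 ↔ PySem.Set.contains F c = true) := by
      intro c; rw [hupd]; split_ifs with h
      · subst h; simpa using hF c
      · exact hF c
    have hget : reg'.get? y = some (reg'.getD y (0, 0)) := pvAUpdate_get?_self s reg k y
    have hy2 : 0 < (reg'.getD y (0, 0)).2 := by
      rw [hupd]; have := hq y; simp; omega
    simp only [pvALoop, ← hreg', hget]
    by_cases hmem : PySem.Set.contains F y = true
    · have hy1 : 0 < (reg'.getD y (0, 0)).1 := (hF' y).mpr hmem
      rw [if_pos ⟨hy1, hy2⟩, pvBScan, if_pos hmem]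
    · have hy1 : ¬ 0 < (reg'.getD y (0, 0)).1 := fun h => hmem ((hF' y).mp h)
      rw [if_neg (by exact fun h => hy1 h.1)]
      rw [pvBScan, if_neg hmem]
      exact ih (k + 1) reg' (by omega) hq' hF'

-- main Option-level equivalence, for every string (found or not)
theorem pvLoop_eq (l : List Char) :
    pvALoop ((l.length : Int) / 2) (PySem.List.enumerate l 0) PySem.Dict.empty =
      pvBScan (PySem.Set.ofList (l.take (l.length / 2))) (l.drop (l.length / 2)) := by
  set n := l.length with hn
  set sN := n / 2 with hsN
  set s : Int := (n : Int) / 2 with hs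
  have hsNle : sN ≤ n := Nat.div_le_self n 2
  have hcast : (sN : Int) = s := by
    rw [hs, hsN]; omega
  have hsplit : l = l.take sN ++ l.drop sN := (List.take_append_drop sN l).symm
  have hlen_take : (l.take sN).length = sN := by
    rw [List.length_take]; omega
  have henum : PySem.List.enumerate l 0 =
      PySem.List.enumerate (l.take sN) 0 ++ PySem.List.enumerate (l.drop sN) (0 + (l.take sN).length) := by
    conv_lhs => rw [hsplit]
    exact PySem.List.enumerate_append _ _ _
  have hempty_q : ∀ c : Char, ((PySem.Dict.empty : PySem.Dict Char (Int × Int)).getD c (0, 0)).2 = 0 := by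
    intro c; simp [PySem.Dict.getD_empty]
  have hempty_p : ∀ c : Char, 0 ≤ ((PySem.Dict.empty : PySem.Dict Char (Int × Int)).getD c (0, 0)).1 := by
    intro c; simp [PySem.Dict.getD_empty]
  have hbound : (0 : Int) + (l.take sN).length ≤ s := by
    rw [hlen_take]; omega
  obtain ⟨hnone, hq2, hp2, hpos⟩ :=
    pvALoop_phase1 s (l.take sN) 0 PySem.Dict.empty hbound hempty_q hempty_p
  rw [henum, pvALoop_append, hnone]
  have hk2 : s ≤ (0 : Int) + (l.take sN).length := by rw [hlen_take]; omega
  refine pvALoop_phase2' s (l.drop sN) (PySem.Set.ofList (l.take sN)) _ _ hk2 ?_ ?_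
  · intro c; have := hq2 c; omega
  · intro c
    rw [hpos c]
    simp [PySem.Dict.getD_empty, PySem.Set.contains, PySem.Set.mem_ofList]

-- ===== VERDICT (by name: the statement is the Claim_ definition above) =====
theorem get_common_item_in_compartments_spec : Claim_equal_get_common_item_in_compartments := by
  intro items _ _
  unfold Spec_get_common_item_in_compartments
  unfold get_common_item_in_compartments get_common_item_in_compartments_alt
  rw [pvLoop_eq items.toList]
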